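-- pv_equiv track=rewrite | github.com/taisti/ner | src/prepare_data_utils.py | get_first_broken_span
-- ===== SOURCE A (Python) =====
-- def get_first_broken_span(biluo_entities):
--     """
--     Locate first incomplete entity
--     """
--     broken_span_idx = 0
--     for idx in range(len(biluo_entities)):
--         if "B-" in biluo_entities[idx] or "U-" in biluo_entities[idx]:
--             broken_span_idx += 1
--         elif biluo_entities[idx] == "-":
--             break
--
--     return broken_span_idx
-- ===== SOURCE B (Python) =====
-- def get_first_broken_span(biluo_entities):
--     try:
--         end = biluo_entities.index("-")
--     except ValueError:
--         end = len(biluo_entities)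
--     return sum(1 for tag in biluo_entities[:end] if "B-" in tag or "U-" in tag)
-- ===== Notes on version B (the rewrite author's own statement) =====
-- stated objective: simpler
-- what changed: Replaced A's single interleaved scan with an in-loop counter and break by a two-step decomposition: locate the boundary with list.index('-') (falling back to len on ValueError), then count 'B-'/'U-' tags in the prefix with a generator sum.
import Mathlib
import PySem

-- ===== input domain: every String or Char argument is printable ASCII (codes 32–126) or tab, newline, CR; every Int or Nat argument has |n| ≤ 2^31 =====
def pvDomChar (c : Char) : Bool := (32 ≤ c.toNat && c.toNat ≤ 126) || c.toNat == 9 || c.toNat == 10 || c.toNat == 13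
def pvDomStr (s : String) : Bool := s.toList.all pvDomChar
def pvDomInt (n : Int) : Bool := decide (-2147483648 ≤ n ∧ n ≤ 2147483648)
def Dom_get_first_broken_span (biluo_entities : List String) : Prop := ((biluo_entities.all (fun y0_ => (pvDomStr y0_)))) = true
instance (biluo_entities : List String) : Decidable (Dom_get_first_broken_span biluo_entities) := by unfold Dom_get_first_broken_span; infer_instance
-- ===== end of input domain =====

-- B replaces A's interleaved count-and-break scan by a boundary-index lookup followed by a prefix count (simpler decomposition).

-- ===== PORT A =====
-- A's for-loop over the list with an accumulator and a break on "-"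
def pvLoopA : List String → Int → Int
  | [], acc => acc
  | t :: ts, acc =>
    if PySem.Str.isIn "B-" t || PySem.Str.isIn "U-" t then pvLoopA ts (acc + 1)
    else if t == "-" then acc
    else pvLoopA ts acc

def get_first_broken_span (biluo_entities : List String) : Int :=
  pvLoopA biluo_entities 0

-- ===== PORT B =====
def get_first_broken_span_alt (biluo_entities : List String) : Int :=
  let e : Nat := (PySem.List.index? biluo_entities "-").getD biluo_entities.length
  ((biluo_entities.take e).countP
      (fun tag => PySem.Str.isIn "B-" tag || PySem.Str.isIn "U-" tag) : Int)

-- ===== PRECONDITION & SPEC =====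
def Spec_get_first_broken_span (biluo_entities : List String) (out : Int) : Prop := out = get_first_broken_span_alt biluo_entities
instance (biluo_entities : List String) (out : Int) : Decidable (Spec_get_first_broken_span biluo_entities out) := by unfold Spec_get_first_broken_span; infer_instance

-- ===== CLAIM (what is proved, stated in full; the proofs are below) =====
def Claim_equal_get_first_broken_span : Prop := ∀ (biluo_entities : List String), Dom_get_first_broken_span biluo_entities → Spec_get_first_broken_span biluo_entities (get_first_broken_span biluo_entities)

-- ===== LEMMAS AND PROOFS =====
theorem pvLoopA_eq_alt (xs : List String) (acc : Int) :
    pvLoopA xs acc = acc + get_first_broken_span_alt xs := by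
  induction xs generalizing acc with
  | nil => simp [pvLoopA, get_first_broken_span_alt]
  | cons t ts ih =>
    by_cases hp : (PySem.Str.isIn "B-" t || PySem.Str.isIn "U-" t) = true
    · have hp2 : PySem.Chars.isIn ['B', '-'] t.toList = true ∨
          PySem.Chars.isIn ['U', '-'] t.toList = true := by simpa using hp
      have htne : t ≠ "-" := by
        intro h; subst h; revert hp; decide
      rw [show pvLoopA (t :: ts) acc = pvLoopA ts (acc + 1) by
            simp only [pvLoopA]; rw [if_pos hp], ih]
      simp only [get_first_broken_span_alt]
      rw [PySem.List.index?_cons_of_ne ts htne]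
      cases hidx : PySem.List.index? ts "-" with
      | none => simp [List.countP_cons]; rw [if_pos hp2]; ring
      | some k => simp [List.countP_cons]; rw [if_pos hp2]; ring
    · by_cases hd : t = "-"
      · subst hd
        rw [show pvLoopA ("-" :: ts) acc = acc by
              simp only [pvLoopA]; rw [if_neg (by simpa using hp)]; simp]
        simp [get_first_broken_span_alt]
      · have hp2 : PySem.Chars.isIn ['B', '-'] t.toList = false ∧
            PySem.Chars.isIn ['U', '-'] t.toList = false := by simpa using hp
        rw [show pvLoopA (t :: ts) acc = pvLoopA ts acc by
              simp only [pvLoopA]; rw [if_neg (by simpa using hp), if_neg (by simpa using hd)], ih]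
        simp only [get_first_broken_span_alt]
        rw [PySem.List.index?_cons_of_ne ts hd]
        cases hidx : PySem.List.index? ts "-" with
        | none => simp [hp2]
        | some k => simp [hp2]

-- ===== VERDICT (by name: the statement is the Claim_ definition above) =====
theorem get_first_broken_span_spec : Claim_equal_get_first_broken_span := by
  intro xs _
  show get_first_broken_span xs = get_first_broken_span_alt xs
  rw [get_first_broken_span, pvLoopA_eq_alt]; ring
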